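-- pv_equiv track=rewrite | github.com/Inthedawn1001/BiopharmaAgent | src/biopharma_agent/orchestration/source_state.py | _failure_type_counts
-- ===== SOURCE A (Python) =====
-- from typing import Any, Protocol
--
-- def _failure_type_counts(items: list[dict[str, Any]]) -> dict[str, int]:
--     counts: dict[str, int] = {}
--     for item in items:
--         failure_type = str(item.get("failure_type") or "none")
--         if failure_type == "none":
--             continue
--         counts[failure_type] = counts.get(failure_type, 0) + 1
--     return dict(sorted(counts.items()))
-- ===== SOURCE B (Python) =====
-- def _failure_type_counts(items):
--     # sort-then-group: collect the non-'none' failure types, sort them,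
--     # and emit one (key, run-length) entry per run of equal values.
--     fts = sorted(
--         ft
--         for item in items
--         for ft in [str(item.get("failure_type") or "none")]
--         if ft != "none"
--     )
--     counts = {}
--     i = 0
--     n = len(fts)
--     while i < n:
--         j = i + 1
--         while j < n and fts[j] == fts[i]:
--             j += 1
--         counts[fts[i]] = j - i
--         i = j
--     return counts
-- ===== Notes on version B (the rewrite author's own statement) =====
-- stated objective: alternative
-- what changed: A counts failure types in a dict while scanning and sorts the (key,count) items at the end; B collects the non-'none' failure-type strings into a flat list, sorts it, and run-length-groups the sorted list, so the counts are run lengths and the keys come out in sorted order by construction.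
import Mathlib
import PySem

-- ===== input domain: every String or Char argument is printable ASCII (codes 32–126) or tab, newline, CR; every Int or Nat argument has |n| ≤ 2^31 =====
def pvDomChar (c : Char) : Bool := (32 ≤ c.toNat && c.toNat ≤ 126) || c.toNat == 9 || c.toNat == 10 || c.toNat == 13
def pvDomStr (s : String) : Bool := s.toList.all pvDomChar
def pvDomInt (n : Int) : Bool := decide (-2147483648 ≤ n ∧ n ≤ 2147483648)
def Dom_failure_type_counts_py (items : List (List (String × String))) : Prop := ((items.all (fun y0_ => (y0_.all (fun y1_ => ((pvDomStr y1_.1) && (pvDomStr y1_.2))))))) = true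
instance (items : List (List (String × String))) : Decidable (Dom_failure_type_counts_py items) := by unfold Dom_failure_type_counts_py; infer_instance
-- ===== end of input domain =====

-- B replaces A's hash-count-then-sort by collect-sort-then-run-length-group (alternative algorithm, same result).

-- shared helper: str(item.get("failure_type") or "none")  (both Pythons contain this exact expression)
def pyFailureType (item : List (String × String)) : String :=
  match List.lookup "failure_type" item with
  | some s => if s == "" then "none" else s
  | none => "none"

-- ===== PORT A =====
def failure_type_counts_py (items : List (List (String × String))) : List (String × Int) :=
  let counts : PySem.Dict String Int :=
    items.foldl (fun counts item =>
      let failure_type := pyFailureType item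
      if failure_type == "none" then counts
      else counts.insert failure_type (counts.getD failure_type 0 + 1)) PySem.Dict.empty
  PySem.List.sorted2 counts.items (fun p => p.1) (fun p => p.2) false

-- ===== PORT B =====
-- the inner while loop of Source B: scan the run of elements equal to the head, record its length, continue after it
def runCounts : List String → List (String × Int)
  | [] => []
  | x :: t =>
      (x, 1 + ((t.takeWhile (fun y => y == x)).length : Int)) :: runCounts (t.dropWhile (fun y => y == x))
  termination_by l => l.length
  decreasing_by
    simp only [List.length_cons]
    exact Nat.lt_succ_of_le (List.length_dropWhile_le _ _)

def failure_type_counts_py_alt (items : List (List (String × String))) : List (String × Int) :=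
  let fts := items.foldl (fun acc item =>
      let ft := pyFailureType item
      if ft != "none" then acc ++ [ft] else acc) []
  runCounts (PySem.List.sorted fts (fun x => x) false)

-- ===== PRECONDITION & SPEC =====
def Spec_failure_type_counts_py (items : List (List (String × String))) (out : List (String × Int)) : Prop := out = failure_type_counts_py_alt items
instance (items : List (List (String × String))) (out : List (String × Int)) : Decidable (Spec_failure_type_counts_py items out) := by unfold Spec_failure_type_counts_py; infer_instance

-- ===== CLAIM (what is proved, stated in full; the proofs are below) =====
def Claim_equal_failure_type_counts_py : Prop := ∀ (items : List (List (String × String))), Dom_failure_type_counts_py items → Spec_failure_type_counts_py items (failure_type_counts_py items)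

-- ===== LEMMAS AND PROOFS =====

-- the flat list of counted failure-type strings, common to both proofs
def ftList (items : List (List (String × String))) : List String :=
  (items.filter (fun it => pyFailureType it != "none")).map pyFailureType

-- A's dict-building loop is Counter(ftList items)
theorem A_fold_eq (items : List (List (String × String))) :
    items.foldl (fun (counts : PySem.Dict String Int) item =>
      let failure_type := pyFailureType item
      if failure_type == "none" then counts
      else counts.insert failure_type (counts.getD failure_type 0 + 1)) PySem.Dict.empty
    = PySem.Dict.counter (ftList items) := by
  have hcongr : items.foldl (fun (counts : PySem.Dict String Int) item =>
      let failure_type := pyFailureType item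
      if failure_type == "none" then counts
      else counts.insert failure_type (counts.getD failure_type 0 + 1)) PySem.Dict.empty
      = items.foldl (fun (counts : PySem.Dict String Int) item =>
      if (pyFailureType item != "none") then
        counts.insert (pyFailureType item) (counts.getD (pyFailureType item) 0 + 1)
      else counts) PySem.Dict.empty := by
    refine PySem.List.foldl_congr_mem _ _ _ _ (fun acc x _ => ?_)
    by_cases h : pyFailureType x = "none" <;> simp [h]
  rw [hcongr, PySem.List.foldl_if_eq_foldl_filter]
  show _ = (ftList items).foldl _ _
  rw [ftList, List.foldl_map]
  rfl

-- B's collecting loop builds ftList items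
theorem B_fold_eq (items : List (List (String × String))) :
    items.foldl (fun acc item =>
      let ft := pyFailureType item
      if ft != "none" then acc ++ [ft] else acc) ([] : List String) = ftList items := by
  rw [PySem.List.foldl_append_if]
  simp [ftList]

-- generic facts about PySem.Set.ofList (first-occurrence dedup)
theorem foldl_add_of_forall_eq (x : String) :
    ∀ (tw : List String) (acc : PySem.Set String), (∀ y ∈ tw, y = x) → x ∈ acc →
      tw.foldl PySem.Set.add acc = acc := by
  intro tw
  induction tw with
  | nil => intro acc _ _; rfl
  | cons y t ih =>
      intro acc h hx
      have hy : y = x := h y (by simp)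
      have : PySem.Set.add acc y = acc := by
        simp [PySem.Set.add, PySem.Set.contains, hy, hx]
      simpa [this] using ih acc (fun z hz => h z (by simp [hz])) hx

theorem cons_foldl_add (x : String) :
    ∀ (dw : List String) (acc : List String), x ∉ dw →
      dw.foldl PySem.Set.add (x :: acc) = x :: dw.foldl PySem.Set.add acc := by
  intro dw
  induction dw with
  | nil => intro acc _; rfl
  | cons y t ih =>
      intro acc hx
      have hyx : y ≠ x := by intro h; exact hx (by simp [h])
      have hstep : PySem.Set.add (x :: acc) y = x :: PySem.Set.add acc y := by
        simp [PySem.Set.add, PySem.Set.contains, hyx]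
        by_cases h : y ∈ acc <;> simp [h]
      rw [List.foldl_cons, hstep, List.foldl_cons,
        ih (PySem.Set.add acc y) (fun h => hx (by simp [h]))]

theorem ofList_sublist : ∀ (l acc : List String), (List.foldl PySem.Set.add acc l).Sublist (acc ++ l) := by
  intro l
  induction l with
  | nil => intro acc; simp
  | cons y t ih =>
      intro acc
      rw [List.foldl_cons]
      refine (ih (PySem.Set.add acc y)).trans ?_
      by_cases h : PySem.Set.contains acc y = true
      · have ha : PySem.Set.add acc y = acc := by unfold PySem.Set.add; rw [if_pos h]
        rw [ha]
        exact List.Sublist.append_left (List.sublist_cons_self _ _) _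
      · have ha : PySem.Set.add acc y = acc ++ [y] := by unfold PySem.Set.add; rw [if_neg h]
        rw [ha, List.append_assoc]
        simp

-- run-length grouping of a ≤-sorted list is (first-occurrence keys, multiplicities)
theorem runCounts_of_sorted : ∀ (m : List String), m.Pairwise (· ≤ ·) →
    runCounts m = (PySem.Set.ofList m).map (fun k => (k, (List.count k m : Int))) := by
  intro m
  induction m using runCounts.induct with
  | case1 => intro _; simp [runCounts, PySem.Set.ofList_eq_foldl]
  | case2 x t ih =>
      intro h
      have hx : ∀ y ∈ t, x ≤ y := (List.pairwise_cons.mp h).1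
      have ht : t.Pairwise (· ≤ ·) := (List.pairwise_cons.mp h).2
      set tw := t.takeWhile (fun y => y == x) with htw
      set dw := t.dropWhile (fun y => y == x) with hdw
      have hsplit : tw ++ dw = t := List.takeWhile_append_dropWhile
      have htw_eq : ∀ y ∈ tw, y = x := by
        intro y hy
        have := List.mem_takeWhile_imp hy
        simpa using this
      have hdw_pair : dw.Pairwise (· ≤ ·) := by
        have h1 : (tw ++ dw).Pairwise (· ≤ ·) := hsplit ▸ ht
        exact List.Pairwise.sublist (List.sublist_append_right tw dw) h1
      have hxdw : x ∉ dw := by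
        cases hd : dw with
        | nil => simp
        | cons d dt =>
            have hdfalse : ¬ (d == x) = true := by
              have := List.head?_dropWhile_not (fun y => y == x) t
              rw [← hdw, hd] at this
              simpa using this
            have hdx : d ≠ x := by simpa using hdfalse
            intro hmem
            rcases List.mem_cons.mp hmem with h1 | h1
            · exact hdx h1.symm
            · -- x ∈ dt : then d ≤ x (pairwise) and x ≤ d (hx), so d = x
              have hdmem : d ∈ t := hsplit ▸ (by simp [hd])
              have h2 : d ≤ x := by
                have := hd ▸ hdw_pair
                exact (List.pairwise_cons.mp this).1 x h1
              have h3 : x ≤ d := hx d hdmem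
              exact hdx (le_antisymm h2 h3)
      have hcount_tw : List.count x tw = tw.length :=
        List.count_eq_length.mpr (fun b hb => (htw_eq b hb).symm)
      have hcount_dw : List.count x dw = 0 := List.count_eq_zero.mpr hxdw
      have hofList : PySem.Set.ofList (x :: t) = x :: PySem.Set.ofList dw := by
        rw [PySem.Set.ofList_eq_foldl, ← hsplit]
        have h0 : PySem.Set.add ([] : List String) x = [x] := rfl
        rw [List.foldl_cons, h0, List.foldl_append,
          foldl_add_of_forall_eq x tw [x] htw_eq (by simp),
          cons_foldl_add x dw [] hxdw, ← PySem.Set.ofList_eq_foldl]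
      have hcount_rest : ∀ k ∈ PySem.Set.ofList dw,
          List.count k (x :: t) = List.count k dw := by
        intro k hk
        have hkdw : k ∈ dw := (PySem.Set.mem_ofList dw k).mp hk
        have hkx : k ≠ x := fun h => hxdw (h ▸ hkdw)
        have hktw : List.count k tw = 0 :=
          List.count_eq_zero.mpr (fun hmem => hkx (htw_eq k hmem))
        rw [← hsplit]
        simp [List.count_append, Ne.symm hkx, hktw]
      rw [runCounts]
      rw [hofList, List.map_cons]
      congr 1
      · have : List.count x (x :: t) = 1 + tw.length := by
          rw [← hsplit]
          simp [List.count_append, hcount_tw, hcount_dw, Nat.add_comm]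
        rw [this]
        push_cast
        rfl
      · rw [← hdw, ih hdw_pair]
        exact (List.map_congr_left (fun k hk => by rw [hcount_rest k hk])).symm

-- sorted2 with a lexicographic pair of keys is sorted with the Lex key
theorem sorted2_eq_sorted_lex (xs : List (String × Int)) :
    PySem.List.sorted2 xs (fun p => p.1) (fun p => p.2) false
      = PySem.List.sorted xs (fun p => toLex (p.1, p.2)) false := by
  have hfun : (fun (a b : String × Int) =>
        decide (a.1 < b.1) || (!decide (b.1 < a.1) && decide (a.2 < b.2)))
      = (fun (a b : String × Int) =>
        decide ((toLex (a.1, a.2) : Lex (String × Int)) < toLex (b.1, b.2))) := by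
    funext a b
    rcases lt_trichotomy a.1 b.1 with h | h | h
    · simp [Prod.Lex.lt_iff, h]
    · simp [Prod.Lex.lt_iff, h]
    · simp [Prod.Lex.lt_iff, h, h.not_gt, h.ne']
  show xs.foldl (fun acc x => PySem.List.insertBy (fun a b =>
        decide (a.1 < b.1) || (!decide (b.1 < a.1) && decide (a.2 < b.2))) x acc) []
      = xs.foldl (fun acc x => PySem.List.insertBy (fun a b =>
        decide ((toLex (a.1, a.2) : Lex (String × Int)) < toLex (b.1, b.2))) x acc) []
  rw [hfun]

-- the central equality, stated on the flat list
theorem main_eq (l : List String) :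
    PySem.List.sorted2 (PySem.Dict.counter l).items (fun p => p.1) (fun p => p.2) false
      = runCounts (PySem.List.sorted l (fun x => x) false) := by
  set S := PySem.List.sorted l (fun x => x) false with hS
  have hSperm : S.Perm l := PySem.List.sorted_perm l _ _
  have hSpair : S.Pairwise (· ≤ ·) := by
    have := PySem.List.sorted_pairwise l (fun x => x)
    simpa [← hS] using this
  have hrun : runCounts S = (PySem.Set.ofList S).map (fun k => (k, (List.count k S : Int))) :=
    runCounts_of_sorted S hSpair
  rw [sorted2_eq_sorted_lex, PySem.Dict.items_counter, hrun]
  -- keys of S: first-occurrence dedup, strictly increasing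
  have hkeys_sub : (PySem.Set.ofList S).Sublist S := by
    have := ofList_sublist S []
    simpa [PySem.Set.ofList_eq_foldl] using this
  have hkeys_le : (PySem.Set.ofList S).Pairwise (· ≤ ·) := List.Pairwise.sublist hkeys_sub hSpair
  have hkeys_ne : (PySem.Set.ofList S).Pairwise (· ≠ ·) := PySem.Set.nodup_ofList S
  have hkeys_lt : (PySem.Set.ofList S).Pairwise (· < ·) :=
    (hkeys_le.and hkeys_ne).imp (fun h => lt_of_le_of_ne h.1 h.2)
  apply PySem.List.sorted_eq_of_perm_of_pairwise_lt
    (key := fun p : String × Int => (toLex (p.1, p.2) : Lex (String × Int)))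
  · -- permutation
    have hmem : ∀ a, a ∈ PySem.Set.ofList S ↔ a ∈ PySem.Set.ofList l := by
      intro a
      rw [PySem.Set.mem_ofList, PySem.Set.mem_ofList]
      exact ⟨fun h => hSperm.mem_iff.mp h, fun h => hSperm.mem_iff.mpr h⟩
    have hperm : (PySem.Set.ofList S).Perm (PySem.Set.ofList l) :=
      (List.perm_ext_iff_of_nodup (PySem.Set.nodup_ofList S) (PySem.Set.nodup_ofList l)).mpr hmem
    have hcnt : ∀ k ∈ PySem.Set.ofList S,
        ((k, (List.count k S : Int)) : String × Int) = (k, (List.count k l : Int)) :=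
      fun k _ => by rw [hSperm.count_eq k]
    rw [List.map_congr_left hcnt]
    exact hperm.map _
  · -- pairwise strict Lex order on the mapped list
    rw [List.pairwise_map]
    exact hkeys_lt.imp (fun h => Prod.Lex.lt_iff.mpr (Or.inl h))

-- ===== VERDICT (by name: the statement is the Claim_ definition above) =====
theorem failure_type_counts_py_spec : Claim_equal_failure_type_counts_py := by
  intro items _
  show failure_type_counts_py items = failure_type_counts_py_alt items
  rw [failure_type_counts_py, failure_type_counts_py_alt]
  simp only [A_fold_eq, B_fold_eq]
  exact main_eq (ftList items)
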